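-- pv_equiv track=rewrite | github.com/zeyygt/automated-sustainability-report-generation-with-carbon-footprint-estimation-using-RAG | rag_retrieval/parsing.py | _segment_column_bounds
-- ===== SOURCE A (Python) =====
-- def _segment_column_bounds(segment: list[tuple[int, list[str]]]) -> tuple[int, int]:
--     non_empty_cols = [
--         index
--         for _, row_values in segment
--         for index, value in enumerate(row_values)
--         if value.strip()
--     ]
--     if not non_empty_cols:
--         return 0, 0
--     return min(non_empty_cols), max(non_empty_cols)
-- ===== SOURCE B (Python) =====
-- def _row_first(row: list[str]):
--     # first non-blank column in one row (early exit)
--     for i, v in enumerate(row):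
--         if v.strip():
--             return i
--     return None
--
--
-- def _row_last(row: list[str]):
--     # last non-blank column in one row (backward scan, early exit)
--     for i, v in reversed(list(enumerate(row))):
--         if v.strip():
--             return i
--     return None
--
--
-- def _segment_column_bounds(segment: list[tuple[int, list[str]]]) -> tuple[int, int]:
--     lo = None
--     hi = None
--     for _, row_values in segment:
--         f = _row_first(row_values)
--         if f is None:
--             continue
--         l = _row_last(row_values)
--         lo = f if lo is None else min(lo, f)
--         hi = l if hi is None else max(hi, l)
--     if lo is None:
--         return 0, 0
--     return lo, hi
-- ===== Notes on version B (the rewrite author's own statement) =====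
-- stated objective: alternative
-- what changed: Instead of A's flat list of every non-blank cell index reduced by min and max, B decomposes per row: each row contributes only its first non-blank column (forward scan with early exit) and its last one (backward scan with early exit), and these per-row bounds are merged across rows; correctness rests on column indices within a row being increasing, so a row's first/last non-blank index is its min/max.
import Mathlib
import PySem

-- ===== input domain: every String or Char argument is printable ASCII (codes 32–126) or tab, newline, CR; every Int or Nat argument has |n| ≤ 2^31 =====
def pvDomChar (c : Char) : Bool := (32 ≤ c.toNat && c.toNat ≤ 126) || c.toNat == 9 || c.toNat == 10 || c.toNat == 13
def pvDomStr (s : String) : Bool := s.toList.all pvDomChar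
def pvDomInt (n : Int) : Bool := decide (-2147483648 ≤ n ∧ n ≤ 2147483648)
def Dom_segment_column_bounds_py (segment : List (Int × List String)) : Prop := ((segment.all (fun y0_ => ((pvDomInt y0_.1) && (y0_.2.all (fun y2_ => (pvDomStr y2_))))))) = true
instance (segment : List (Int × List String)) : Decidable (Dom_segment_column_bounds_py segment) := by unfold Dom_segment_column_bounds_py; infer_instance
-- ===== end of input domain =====

-- B decomposes per row: each row contributes only its first (forward early-exit scan) and last (backward early-exit scan) non-blank column index, merged across rows; A flattens all non-blank indices into one list and takes min/max.


-- ===== PORT A =====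
-- the list comprehension: collect the index of every cell whose stripped value is non-empty
def segment_column_bounds_py (segment : List (Int × List String)) : Int × Int :=
  let non_empty_cols : List Int :=
    segment.flatMap (fun p =>
      (PySem.List.enumerate p.2 0).filterMap (fun iv =>
        if PySem.Str.strip iv.2 ≠ "" then some iv.1 else none))
  if non_empty_cols = [] then (0, 0)
  else ((PySem.List.min? non_empty_cols (fun y => y)).getD 0,
        (PySem.List.max? non_empty_cols (fun y => y)).getD 0)

-- ===== PORT B =====
-- _row_first: forward scan with early exit (first non-blank cell's index)
def pvRowFirst (row : List String) : Option Int :=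
  ((PySem.List.enumerate row 0).find? (fun iv => !(PySem.Str.strip iv.2 == ""))).map (·.1)

-- _row_last: scan over reversed(list(enumerate(row))) with early exit
def pvRowLast (row : List String) : Option Int :=
  ((PySem.List.enumerate row 0).reverse.find? (fun iv => !(PySem.Str.strip iv.2 == ""))).map (·.1)

-- 'f if lo is None else min(lo, f)' / the max counterpart
def pvMergeMin (a : Option Int) (i : Int) : Option Int :=
  match a with | none => some i | some lo => some (min lo i)
def pvMergeMax (a : Option Int) (i : Int) : Option Int :=
  match a with | none => some i | some hi => some (max hi i)

def segment_column_bounds_py_alt (segment : List (Int × List String)) : Int × Int :=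
  let r := segment.foldl (fun acc p =>
    match pvRowFirst p.2 with
    | none => acc  -- continue
    | some f =>
        -- here _row_last cannot be None (the row has a non-blank cell); getD 0 is a totality guard
        let l := (pvRowLast p.2).getD 0
        (pvMergeMin acc.1 f, pvMergeMax acc.2 l)) (none, none)
  match r with
  | (some lo, some hi) => (lo, hi)
  | _ => (0, 0)

-- ===== PRECONDITION & SPEC =====
def Spec_segment_column_bounds_py (segment : List (Int × List String)) (out : Int × Int) : Prop := out = segment_column_bounds_py_alt segment
instance (segment : List (Int × List String)) (out : Int × Int) : Decidable (Spec_segment_column_bounds_py segment out) := by unfold Spec_segment_column_bounds_py; infer_instance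

-- ===== CLAIM (what is proved, stated in full; the proofs are below) =====
def Claim_equal_segment_column_bounds_py : Prop := ∀ (segment : List (Int × List String)), Dom_segment_column_bounds_py segment → Spec_segment_column_bounds_py segment (segment_column_bounds_py segment)

-- ===== LEMMAS AND PROOFS =====

-- the non-blank indices of one row (A's inner comprehension over one row)
def pvRowCols (l : List (Int × String)) : List Int :=
  l.filterMap (fun iv => if PySem.Str.strip iv.2 ≠ "" then some iv.1 else none)

def pvBStep (acc : Option Int × Option Int) (i : Int) : Option Int × Option Int :=
  (pvMergeMin acc.1 i, pvMergeMax acc.2 i)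

-- find? of the first non-blank = head of the collected index list
lemma rowFirst_eq (l : List (Int × String)) :
    ((l.find? (fun iv => !(PySem.Str.strip iv.2 == ""))).map (·.1)) = (pvRowCols l).head? := by
  induction l with
  | nil => rfl
  | cons x t ih =>
      by_cases h : PySem.Str.strip x.2 = ""
      · simp [pvRowCols, h] at *; simpa [pvRowCols] using ih
      · simp [pvRowCols, h]

lemma rowLast_eq (l : List (Int × String)) :
    ((l.reverse.find? (fun iv => !(PySem.Str.strip iv.2 == ""))).map (·.1)) = (pvRowCols l).getLast? := by
  have := rowFirst_eq l.reverse
  simpa [pvRowCols, List.filterMap_reverse, List.head?_reverse] using this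

-- folding pvBStep splits into the two independent min/max folds
lemma foldl_bstep_split (l : List Int) (acc : Option Int × Option Int) :
    l.foldl pvBStep acc = (l.foldl pvMergeMin acc.1, l.foldl pvMergeMax acc.2) := by
  induction l generalizing acc with
  | nil => rfl
  | cons x t ih => simp [List.foldl_cons, pvBStep, ih]

lemma foldl_mergeMin_const (t : List Int) (m : Int) (h : ∀ x ∈ t, m ≤ x) :
    t.foldl pvMergeMin (some m) = some m := by
  induction t with
  | nil => rfl
  | cons x t ih =>
      have hx := h x (by simp)
      simp only [List.foldl_cons, pvMergeMin, min_eq_left hx]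
      exact ih (fun y hy => h y (by simp [hy]))

lemma mergeMax_absorb (a : Option Int) (c x : Int) (h : c ≤ x) :
    pvMergeMax (pvMergeMax a c) x = pvMergeMax a x := by
  cases a with
  | none => simp [pvMergeMax, max_eq_right h]
  | some y => simp [pvMergeMax, max_assoc, max_eq_right h]

lemma foldl_mergeMax_sorted (t : List Int) (c : Int) (a : Option Int)
    (hs : (c :: t).Pairwise (· ≤ ·)) :
    (c :: t).foldl pvMergeMax a = pvMergeMax a ((c :: t).getLast (by simp)) := by
  induction t generalizing c a with
  | nil => rfl
  | cons d t ih =>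
      have hcd : ∀ x ∈ d :: t, c ≤ x := (List.pairwise_cons.mp hs).1
      have hs' : (d :: t).Pairwise (· ≤ ·) := (List.pairwise_cons.mp hs).2
      have hlast : c ≤ (d :: t).getLast (by simp) := hcd _ (List.getLast_mem _)
      calc (c :: d :: t).foldl pvMergeMax a
          = (d :: t).foldl pvMergeMax (pvMergeMax a c) := by simp [List.foldl_cons]
        _ = pvMergeMax (pvMergeMax a c) ((d :: t).getLast (by simp)) := ih d _ hs'
        _ = pvMergeMax a ((d :: t).getLast (by simp)) := mergeMax_absorb _ _ _ hlast
        _ = pvMergeMax a ((c :: d :: t).getLast (by simp)) := by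
              simp [List.getLast_cons]

-- for a ≤-sorted index list, folding pvBStep equals B's head/last step
lemma foldl_bstep_sorted (rc : List Int) (hs : rc.Pairwise (· ≤ ·))
    (acc : Option Int × Option Int) :
    rc.foldl pvBStep acc =
      (match rc.head? with
       | none => acc
       | some f => (pvMergeMin acc.1 f, pvMergeMax acc.2 (rc.getLast?.getD 0))) := by
  cases rc with
  | nil => rfl
  | cons c t =>
      rw [foldl_bstep_split]
      have hct : ∀ x ∈ t, c ≤ x := (List.pairwise_cons.mp hs).1
      have h1 : (c :: t).foldl pvMergeMin acc.1 = pvMergeMin acc.1 c := by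
        simp only [List.foldl_cons]
        cases acc.1 with
        | none => simpa [pvMergeMin] using foldl_mergeMin_const t c hct
        | some lo =>
            simpa [pvMergeMin] using
              foldl_mergeMin_const t (min lo c)
                (fun x hx => le_trans (min_le_right _ _) (hct x hx))
      have h2 := foldl_mergeMax_sorted t c acc.2 hs
      have hgl : ((c :: t).getLast?).getD 0 = (c :: t).getLast (by simp) := by
        simp [List.getLast?_eq_some_getLast]
      simp [h1, h2, hgl]

-- A's comprehension over one row is a ≤-sorted list (enumerate indices increase)
lemma rowCols_sorted (row : List String) :
    (pvRowCols (PySem.List.enumerate row 0)).Pairwise (· ≤ ·) := by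
  have h := PySem.List.pairwise_lt_enumerate (xs := row) (s := 0)
  unfold pvRowCols
  refine List.Pairwise.filterMap _ ?_ h
  intro a b hab x hx y hy
  split at hx <;> split at hy <;> simp_all
  omega

lemma foldl_flatMap {α β γ : Type} (f : γ → β → γ) (g : α → List β) (l : List α) (acc : γ) :
    l.foldl (fun acc a => (g a).foldl f acc) acc = (l.flatMap g).foldl f acc := by
  induction l generalizing acc with
  | nil => rfl
  | cons x t ih => simp [List.foldl_cons, List.flatMap_cons, List.foldl_append, ih]

lemma foldl_step_some (cols : List Int) (lo hi : Int) :
    cols.foldl pvBStep (some lo, some hi) = (some (cols.foldl min lo), some (cols.foldl max hi)) := by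
  induction cols generalizing lo hi with
  | nil => rfl
  | cons c t ih => simp [List.foldl_cons, pvBStep, pvMergeMin, pvMergeMax, ih]

-- B's outer fold equals the flattened pvBStep fold over all collected indices
lemma alt_fold_eq (segment : List (Int × List String)) (acc : Option Int × Option Int) :
    segment.foldl (fun acc p =>
      match pvRowFirst p.2 with
      | none => acc
      | some f => (pvMergeMin acc.1 f, pvMergeMax acc.2 ((pvRowLast p.2).getD 0))) acc
    = (segment.flatMap (fun p => pvRowCols (PySem.List.enumerate p.2 0))).foldl pvBStep acc := by
  rw [← foldl_flatMap]
  induction segment generalizing acc with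
  | nil => rfl
  | cons p t ih =>
      simp only [List.foldl_cons]
      rw [← ih]
      congr 1
      rw [foldl_bstep_sorted _ (rowCols_sorted p.2) acc]
      rw [← rowFirst_eq, ← rowLast_eq]
      rfl

-- ===== VERDICT (by name: the statement is the Claim_ definition above) =====
theorem segment_column_bounds_py_spec : Claim_equal_segment_column_bounds_py := by
  intro segment _
  unfold Spec_segment_column_bounds_py segment_column_bounds_py segment_column_bounds_py_alt
  simp only [alt_fold_eq]
  have hc : (fun p : Int × List String =>
      (PySem.List.enumerate p.2 0).filterMap (fun iv =>
        if PySem.Str.strip iv.2 ≠ "" then some iv.1 else none))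
      = fun p => pvRowCols (PySem.List.enumerate p.2 0) := rfl
  rw [hc]
  set cols := segment.flatMap (fun p => pvRowCols (PySem.List.enumerate p.2 0)) with hcols
  cases cols with
  | nil => rfl
  | cons c t =>
      simp only [List.foldl_cons, pvBStep, pvMergeMin, pvMergeMax, foldl_step_some,
        PySem.List.min?_id_cons, PySem.List.max?_id_cons]
      simp
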